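-- pv_equiv track=rewrite | github.com/costa-group/grey | src/parser/utils_parser.py | number_encoding_size
-- ===== SOURCE A (Python) =====
-- def number_encoding_size(number):
--     i = 0
--
--     if number < 0:
--         number = (2 ** 256) + number
--
--     while number != 0:
--         i += 1
--         number = number >> 8
--     return i
-- ===== SOURCE B (Python) =====
-- def number_encoding_size(number):
--     n = number + 2 ** 256 if number < 0 else number
--     return (n.bit_length() + 7) // 8
-- ===== Notes on version B (the rewrite author's own statement) =====
-- stated objective: simpler
-- what changed: Replaces the per-byte right-shift counting loop with a closed-form expression: the bit length of the sign-adjusted value, rounded up to whole bytes.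
import Mathlib
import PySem

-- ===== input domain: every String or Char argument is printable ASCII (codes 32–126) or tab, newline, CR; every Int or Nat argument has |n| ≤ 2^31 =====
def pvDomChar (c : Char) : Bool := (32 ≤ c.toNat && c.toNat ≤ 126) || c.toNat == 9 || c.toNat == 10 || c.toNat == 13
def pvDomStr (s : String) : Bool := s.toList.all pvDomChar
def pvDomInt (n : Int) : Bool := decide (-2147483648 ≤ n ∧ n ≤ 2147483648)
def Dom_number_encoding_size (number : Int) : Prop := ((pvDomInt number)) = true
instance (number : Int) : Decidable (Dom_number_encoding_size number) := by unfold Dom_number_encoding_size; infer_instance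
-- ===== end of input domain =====

-- B replaces A's per-byte shifting loop with the closed form (bit_length + 7) // 8; objective: simpler.
-- ===== PORT A =====
-- A's while loop: i += 1; number >>= 8 until number == 0. On a nonnegative int,
-- number >> 8 is number / 256; the loop is this structural recursion on Nat.
-- (For a negative loop value Python's while never terminates; inside Dom the
-- sign-adjusted value is always nonnegative, so the Nat loop is exact there.)
def pvALoop (n : Nat) : Nat :=
  if n = 0 then 0 else 1 + pvALoop (n >>> 8)
decreasing_by
  have : n >>> 8 = n / 2 ^ 8 := Nat.shiftRight_eq_div_pow n 8
  omega

def number_encoding_size (number : Int) : Int :=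
  let number := if number < 0 then 2 ^ 256 + number else number
  (pvALoop number.toNat : Int)

-- ===== PORT B =====
-- Source B: n = number + 2**256 if number < 0 else number; (n.bit_length() + 7) // 8.
-- bit_length of a nonnegative int is Nat.size; // on nonnegatives is Nat division.
def number_encoding_size_alt (number : Int) : Int :=
  let n := if number < 0 then number + 2 ^ 256 else number
  ((Nat.size n.toNat + 7) / 8 : Nat)

-- ===== PRECONDITION & SPEC =====
def Spec_number_encoding_size (number : Int) (out : Int) : Prop := out = number_encoding_size_alt number
instance (number : Int) (out : Int) : Decidable (Spec_number_encoding_size number out) := by unfold Spec_number_encoding_size; infer_instance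

-- ===== CLAIM (what is proved, stated in full; the proofs are below) =====
def Claim_equal_number_encoding_size : Prop := ∀ (number : Int), Dom_number_encoding_size number → Spec_number_encoding_size number (number_encoding_size number)

-- ===== LEMMAS AND PROOFS =====

-- ===== VERDICT (by name: the statement is the Claim_ definition above) =====
theorem pvLoop_eq_size (n : Nat) : pvALoop n = (Nat.size n + 7) / 8 := by
  induction n using Nat.strong_induction_on with
  | _ n ih =>
    rw [pvALoop]
    by_cases h : n = 0
    · simp [h]
    · have hsh : n >>> 8 = n / 2 ^ 8 := Nat.shiftRight_eq_div_pow n 8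
      have hlt : n / 2 ^ 8 < n := Nat.div_lt_self (Nat.pos_of_ne_zero h) (by norm_num)
      rw [if_neg h, ih _ (hsh ▸ hlt)]
      have hs1 : 1 ≤ Nat.size n := Nat.size_pos.mpr (Nat.pos_of_ne_zero h)
      by_cases hlt256 : n < 2 ^ 8
      · have h0 : n >>> 8 = 0 := by omega
        have hs8 : Nat.size n ≤ 8 := Nat.size_le.mpr hlt256
        rw [h0]
        simp only [Nat.size_zero]
        omega
      · have hs8 : 8 < Nat.size n := by rw [Nat.lt_size]; omega
        have hup : n < 2 ^ Nat.size n := Nat.lt_size_self n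
        have hlo : 2 ^ (Nat.size n - 1) ≤ n := Nat.lt_size.mp (by omega)
        have hszle : Nat.size (n >>> 8) ≤ Nat.size n - 8 := by
          apply Nat.size_le.mpr
          rw [hsh, Nat.div_lt_iff_lt_mul (by norm_num), ← Nat.pow_add]
          have : Nat.size n - 8 + 8 = Nat.size n := by omega
          rw [this]; exact hup
        have hszge : Nat.size n - 9 < Nat.size (n >>> 8) := by
          rw [Nat.lt_size, hsh, Nat.le_div_iff_mul_le (by norm_num), ← Nat.pow_add]
          calc 2 ^ (Nat.size n - 9 + 8) = 2 ^ (Nat.size n - 1) := by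
                congr 1; omega
            _ ≤ n := hlo
        omega

theorem number_encoding_size_spec : Claim_equal_number_encoding_size := by
  intro number _
  unfold Spec_number_encoding_size number_encoding_size number_encoding_size_alt
  simp only [pvLoop_eq_size]
  split_ifs with h
  · norm_num [Int.add_comm]
  · rfl
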